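-- pv_equiv track=rewrite | github.com/whyNLP/Conic10K | src/metric/metric/evaluate.py | auto_interval
-- ===== SOURCE A (Python) =====
-- from tokenize import (NAME, OP)
--
-- def auto_interval(tokens, local_dict, global_dict):
--     """
--     Deal with the intervals (a, b), [a, b], [a, b), (a, b] in sentences.
--      - (a, b) -> tuple(a, b)
--      - (a, b] -> Interval_left_open_right_close(a, b)
--      - [a, b) -> Interval_left_close_right_open(a, b)
--      - [a, b] -> Interval_left_close_right_close(a, b)
--      - {a, b} -> set(a, b)
--     Call before `auto_symbol`.
--     """
--     MAPPING = {
--         # ('(', ')'): 'tuple', # it seems that we need to treat parentheses more carefully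
--                                # TODO: parse tuples to sympy objects. is it necessary?
--         ('(', ']'): 'Interval_left_open_right_close',
--         ('[', ')'): 'Interval_left_close_right_open',
--         ('[', ']'): 'Interval_left_close_right_close',
--         ('{', '}'): 'set', # it is different from python set. just parsed as a function name.
--     }
--     # TODO: here we do not consider the number of the arguments. should we make more constraints?
--
--     result = []
--     stack = []
--
--     for tokNum, tokVal in tokens:
--         if tokNum == OP:
--             name = tokVal
--
--             if name in '([{':
--                 stack.append((name, len(result)))
--             elif name in ')]}':
--                 l_name, l_idx = stack.pop()
--                 func_name = MAPPING.get((l_name, name), None)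
--
--                 if func_name:
--                     result[l_idx] = (OP, '(')
--                     result.insert(l_idx, (NAME, func_name))
--                     tokVal = ')'
--
--         result.append((tokNum, tokVal))
--
--     return result
-- ===== SOURCE B (Python) =====
-- def auto_interval(tokens, local_dict, global_dict):
--     """Two staged passes: first match brackets over token indices and collect
--     (open_idx, close_idx, func_name) triples; then emit the result append-only
--     from a start-index lookup table and a close-index set (no mid-list inserts)."""
--     NAME, OP = 1, 54  # token numbers of tokenize.NAME / tokenize.OP
--     MAPPING = {
--         ('(', ']'): 'Interval_left_open_right_close',
--         ('[', ')'): 'Interval_left_close_right_open',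
--         ('[', ']'): 'Interval_left_close_right_close',
--         ('{', '}'): 'set',
--     }
--     pairs = []
--     stack = []
--     for i, (num, val) in enumerate(tokens):
--         if num == OP and val in '([{':
--             stack.append((i, val))
--         elif num == OP and val in ')]}' and stack:
--             j, l = stack.pop()
--             f = MAPPING.get((l, val))
--             if f is not None:
--                 pairs.append((j, i, f))
--     starts = {}
--     ends = set()
--     for j, i, f in pairs:
--         starts[j] = f
--         ends.add(i)
--     out = []
--     for i, (num, val) in enumerate(tokens):
--         if i in starts:
--             out.append((NAME, starts[i]))
--             out.append((OP, '('))
--         elif i in ends: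
--             out.append((OP, ')'))
--         else:
--             out.append((num, val))
--     return out
-- ===== Notes on version B (the rewrite author's own statement) =====
-- stated objective: alternative
-- what changed: Instead of splicing function-name tokens into the middle of the growing result list (result.insert / index assignment), B first matches brackets over token indices collecting (open_idx, close_idx, func_name) triples, turns them into a start-index table and a close-index set, and emits the output append-only in a final pass.
import Mathlib
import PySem

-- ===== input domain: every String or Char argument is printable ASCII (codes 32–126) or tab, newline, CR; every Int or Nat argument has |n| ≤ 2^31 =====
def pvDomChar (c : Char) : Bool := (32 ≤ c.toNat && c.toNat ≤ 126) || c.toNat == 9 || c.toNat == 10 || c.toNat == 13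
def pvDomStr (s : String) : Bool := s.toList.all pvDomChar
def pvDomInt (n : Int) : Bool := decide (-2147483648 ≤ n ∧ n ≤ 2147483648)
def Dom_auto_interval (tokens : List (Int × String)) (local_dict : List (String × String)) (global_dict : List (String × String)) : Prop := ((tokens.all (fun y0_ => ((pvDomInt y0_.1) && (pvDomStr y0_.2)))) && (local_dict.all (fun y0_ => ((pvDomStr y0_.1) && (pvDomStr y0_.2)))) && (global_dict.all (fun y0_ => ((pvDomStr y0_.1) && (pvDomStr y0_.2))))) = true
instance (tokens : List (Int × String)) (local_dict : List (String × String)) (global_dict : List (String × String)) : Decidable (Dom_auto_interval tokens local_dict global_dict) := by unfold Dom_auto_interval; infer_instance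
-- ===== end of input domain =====

-- B replaces A's mid-list `result.insert` splicing by two staged passes: match
-- brackets over token indices collecting (open, close, name) triples, then emit
-- the output append-only from a start table and a close set (alternative).

-- the MAPPING dict literal of the Python source, shared verbatim by both ports
def pvMapping (l r : String) : Option String :=
  if l == "(" && r == "]" then some "Interval_left_open_right_close"
  else if l == "[" && r == ")" then some "Interval_left_close_right_open"
  else if l == "[" && r == "]" then some "Interval_left_close_right_close"
  else if l == "{" && r == "}" then some "set"
  else none

-- ===== PORT A =====
-- loop body of A: state = (result, stack); stack push = cons (Python list used LIFO)
def pvStepA (st : List (Int × String) × List (String × Nat)) (tok : Int × String) :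
    List (Int × String) × List (String × Nat) :=
  if tok.1 == 54 then                                  -- tokNum == OP (= 54)
    if PySem.Str.isIn tok.2 "([{" then                 -- name in '([{'  (substring test)
      (st.1 ++ [tok], (tok.2, st.1.length) :: st.2)
    else if PySem.Str.isIn tok.2 ")]}" then            -- elif name in ')]}'
      match st.2 with
      | [] => (st.1 ++ [tok], [])                      -- Python raises IndexError here; excluded by Pre_
      | (lname, lidx) :: rest =>
        match pvMapping lname tok.2 with
        | some f =>
            ((PySem.List.insert ((st.1.set lidx (54, "("))) (lidx : Int) (1, f)) ++ [(tok.1, ")")], rest)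
        | none => (st.1 ++ [tok], rest)
    else (st.1 ++ [tok], st.2)
  else (st.1 ++ [tok], st.2)

def auto_interval (tokens : List (Int × String)) (local_dict : List (String × String)) (global_dict : List (String × String)) : List (Int × String) :=
  (tokens.foldl pvStepA ([], [])).1

-- ===== PORT B =====
-- B pass 1: collect matched (open_idx, close_idx, func_name) triples;
-- state = (pairs so far, stack of (token index, bracket name))
def pvPairsStep (st : List (Int × Int × String) × List (Int × String))
    (p : Int × (Int × String)) : List (Int × Int × String) × List (Int × String) :=
  if p.2.1 == 54 && PySem.Str.isIn p.2.2 "([{" then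
    (st.1, (p.1, p.2.2) :: st.2)
  else if p.2.1 == 54 && PySem.Str.isIn p.2.2 ")]}" && !st.2.isEmpty then
    match st.2 with
    | [] => st                                         -- unreachable: stack known nonempty
    | (j, l) :: rest =>
      match pvMapping l p.2.2 with
      | some f => (st.1 ++ [(j, p.1, f)], rest)
      | none => (st.1, rest)
  else st

def auto_interval_alt (tokens : List (Int × String)) (local_dict : List (String × String)) (global_dict : List (String × String)) : List (Int × String) :=
  let pairs := ((PySem.List.enumerate tokens).foldl pvPairsStep ([], [])).1
  -- pass over pairs: starts = {j: f}, ends = {i}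
  let se := pairs.foldl
    (fun st t => (st.1.insert t.1 t.2.2, PySem.Set.add st.2 t.2.1))
    ((PySem.Dict.empty : PySem.Dict Int String), (PySem.Set.empty : PySem.Set Int))
  -- pass 2: append-only emission
  (PySem.List.enumerate tokens).foldl
    (fun out p =>
      match (se.1).get? p.1 with
      | some f => out ++ [(1, f), (54, "(")]
      | none => if PySem.Set.contains se.2 p.1 then out ++ [(54, ")")] else out ++ [p.2])
    []

-- ===== PRECONDITION & SPEC =====
def pvIsOpen (t : Int × String) : Bool := t.1 == 54 && PySem.Str.isIn t.2 "([{"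
def pvIsClose (t : Int × String) : Bool := t.1 == 54 && !PySem.Str.isIn t.2 "([{" && PySem.Str.isIn t.2 ")]}"

-- Pre_ excludes exactly the inputs on which A raises IndexError (a closing bracket OP
-- token reached while no bracket is open, i.e. some prefix has more closers than openers).
def Pre_auto_interval (tokens : List (Int × String)) (local_dict : List (String × String)) (global_dict : List (String × String)) : Prop :=
  ∀ p ∈ tokens.inits, p.countP pvIsClose ≤ p.countP pvIsOpen
instance (tokens : List (Int × String)) (local_dict : List (String × String)) (global_dict : List (String × String)) : Decidable (Pre_auto_interval tokens local_dict global_dict) := by unfold Pre_auto_interval; infer_instance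

def pvWitness_auto_interval : (List (Int × String)) × (List (String × String)) × (List (String × String)) :=
  ([(54, "["), (1, "a"), (54, ","), (1, "b"), (54, ")")], [], [])

def Spec_auto_interval (tokens : List (Int × String)) (local_dict : List (String × String)) (global_dict : List (String × String)) (out : List (Int × String)) : Prop := out = auto_interval_alt tokens local_dict global_dict
instance (tokens : List (Int × String)) (local_dict : List (String × String)) (global_dict : List (String × String)) (out : List (Int × String)) : Decidable (Spec_auto_interval tokens local_dict global_dict out) := by unfold Spec_auto_interval; infer_instance

-- ===== CLAIM (what is proved, stated in full; the proofs are below) =====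
def Claim_equal_auto_interval : Prop := ∀ (tokens : List (Int × String)) (local_dict : List (String × String)) (global_dict : List (String × String)), Dom_auto_interval tokens local_dict global_dict → Pre_auto_interval tokens local_dict global_dict → Spec_auto_interval tokens local_dict global_dict (auto_interval tokens local_dict global_dict)

-- ===== LEMMAS AND PROOFS =====
-- replacement tokens a pairs list prescribes at token index k (none = keep the token)
def pvLook (pairs : List (Int × Int × String)) (k : Int) : Option (List (Int × String)) :=
  match pairs.find? (fun t => t.1 == k) with
  | some t => some [(1, t.2.2), (54, "(")]
  | none => if pairs.any (fun t => t.2.1 == k) then some [(54, ")")] else none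

-- emission of a list of (index, token) pairs under a pairs list
def pvEmit (pairs : List (Int × Int × String)) (l : List (Int × (Int × String))) :
    List (Int × String) :=
  l.flatMap (fun p => (pvLook pairs p.1).getD [p.2])

lemma pvLook_none_iff (pairs : List (Int × Int × String)) (k : Int) :
    pvLook pairs k = none ↔
      pairs.find? (fun t => t.1 == k) = none ∧ pairs.any (fun t => t.2.1 == k) = false := by
  unfold pvLook
  rcases h : pairs.find? (fun t => t.1 == k) with _ | t
  · rcases ha : pairs.any (fun t => t.2.1 == k) with _ | _ <;> simp only [h] <;> simp [ha]
  · simp only [h]; simp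

lemma pvLook_append_ne (pairs : List (Int × Int × String)) (j i k : Int) (f : String)
    (hkj : k ≠ j) (hki : k ≠ i) :
    pvLook (pairs ++ [(j, i, f)]) k = pvLook pairs k := by
  have hfs : List.find? (fun t => t.1 == k) [((j : Int), (i : Int), f)] = none := by
    simp; omega
  have has : ([((j : Int), (i : Int), f)].any fun t => t.2.1 == k) = false := by
    simp; omega
  unfold pvLook
  rw [List.find?_append, List.any_append, hfs, has]
  rcases h : pairs.find? (fun t => t.1 == k) with _ | t <;> simp only [h, Option.none_or, Option.some_or, Bool.or_false]

lemma pvLook_append_left (pairs : List (Int × Int × String)) (j i : Int) (f : String)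
    (h : pairs.find? (fun t => t.1 == j) = none) :
    pvLook (pairs ++ [(j, i, f)]) j = some [(1, f), (54, "(")] := by
  have hfs : List.find? (fun t => t.1 == j) [((j : Int), (i : Int), f)]
      = some ((j : Int), (i : Int), f) := by simp
  unfold pvLook
  rw [List.find?_append, h, hfs]
  rfl

lemma pvLook_append_right (pairs : List (Int × Int × String)) (j i : Int) (f : String)
    (hij : i ≠ j) (h : pairs.find? (fun t => t.1 == i) = none)
    (ha : pairs.any (fun t => t.2.1 == i) = false) :
    pvLook (pairs ++ [(j, i, f)]) i = some [(54, ")")] := by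
  have hfs : List.find? (fun t => t.1 == i) [((j : Int), (i : Int), f)] = none := by
    simp; omega
  have has : ([((j : Int), (i : Int), f)].any fun t => t.2.1 == i) = true := by simp
  unfold pvLook
  rw [List.find?_append, List.any_append, hfs, has, h, ha]
  rfl

lemma pvLook_none_not_memFst (pairs : List (Int × Int × String)) (k : Int)
    (h : pvLook pairs k = none) : k ∉ pairs.map (fun t => t.1) := by
  obtain ⟨hf, _⟩ := (pvLook_none_iff _ _).mp h
  intro hmem
  obtain ⟨t, ht, hteq⟩ := List.mem_map.mp hmem
  have := List.find?_eq_none.mp hf t ht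
  simp [hteq] at this

lemma pvEmit_congr (pairs pairs' : List (Int × Int × String))
    (l : List (Int × (Int × String)))
    (h : ∀ p ∈ l, pvLook pairs' p.1 = pvLook pairs p.1) :
    pvEmit pairs' l = pvEmit pairs l := by
  unfold pvEmit
  refine List.flatMap_congr (fun p hp => ?_)
  rw [h p hp]

lemma pvCount_snoc (p : (Int × String) → Bool) (l : List (Int × String)) (t : Int × String) :
    (l ++ [t]).countP p = l.countP p + (if p t then 1 else 0) := by
  rw [List.countP_append, List.countP_singleton]

lemma pvEmit_snoc (pairs : List (Int × Int × String)) (pre : List (Int × String))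
    (tok : Int × String) :
    pvEmit pairs (PySem.List.enumerate (pre ++ [tok]) 0) =
      pvEmit pairs (PySem.List.enumerate pre 0) ++ (pvLook pairs (pre.length : Int)).getD [tok] := by
  rw [PySem.List.enumerate_append]
  unfold pvEmit
  rw [List.flatMap_append]
  simp [PySem.List.enumerate_cons, PySem.List.enumerate_nil]

lemma pvEmit_decomp (pairs : List (Int × Int × String)) (pre : List (Int × String))
    (ln : Nat) (h : ln < pre.length) :
    pvEmit pairs (PySem.List.enumerate pre 0) =
      pvEmit pairs (PySem.List.enumerate (pre.take ln) 0)
        ++ (pvLook pairs (ln : Int)).getD [pre[ln]]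
        ++ pvEmit pairs (PySem.List.enumerate (pre.drop (ln+1)) ((ln : Int)+1)) := by
  conv_lhs => rw [← List.take_append_drop ln pre, List.drop_eq_getElem_cons h]
  rw [PySem.List.enumerate_append, PySem.List.enumerate_cons]
  unfold pvEmit
  rw [List.flatMap_append]
  have hlen : ((pre.take ln).length : Int) = (ln : Int) := by
    simp [List.length_take, Nat.min_eq_left h.le]
  rw [List.flatMap_cons, hlen]
  simp [List.append_assoc]

lemma pvMain (tokens : List (Int × String))
    (hPre : ∀ p ∈ tokens.inits, p.countP pvIsClose ≤ p.countP pvIsOpen) :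
    ∀ (rest pre : List (Int × String)) (pairs : List (Int × Int × String))
      (sB : List (Int × String)) (sA : List (String × Nat)),
      tokens = pre ++ rest →
      (∀ q ∈ sB, 0 ≤ q.1 ∧ q.1 < (pre.length : Int) ∧ pvLook pairs q.1 = none) →
      (sB.Pairwise (fun a b => b.1 < a.1)) →
      (∀ j : Int, (pre.length : Int) ≤ j → pvLook pairs j = none) →
      sA = sB.map (fun q => (q.2, (pvEmit pairs (PySem.List.enumerate (tokens.take q.1.toNat) 0)).length)) →
      sB.length = pre.countP pvIsOpen - pre.countP pvIsClose →
      ((pairs.map (fun t => t.1)).Nodup) →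
      (rest.foldl pvStepA (pvEmit pairs (PySem.List.enumerate pre 0), sA)).1
        = pvEmit ((PySem.List.enumerate rest (pre.length : Int)).foldl pvPairsStep (pairs, sB)).1
                 (PySem.List.enumerate tokens 0)
      ∧ (((((PySem.List.enumerate rest (pre.length : Int)).foldl pvPairsStep (pairs, sB)).1).map (fun t => t.1)).Nodup) := by
  intro rest
  induction rest with
  | nil =>
    intro pre pairs sB sA h hq hpw hkeys hsA hlen hnd
    simp only [List.append_nil] at h
    subst h
    simp only [List.foldl_nil, PySem.List.enumerate_nil]
    exact ⟨by trivial, hnd⟩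
  | cons tok rest' ih =>
    intro pre pairs sB sA h hq hpw hkeys hsA hlen hnd
    have hpre0 : pre ∈ tokens.inits := (List.mem_inits _ _).mpr ⟨tok :: rest', h.symm⟩
    have hpre1 : (pre ++ [tok]) ∈ tokens.inits := (List.mem_inits _ _).mpr ⟨rest', by rw [h]; simp⟩
    have hPre0 := hPre pre hpre0
    have hPre1 := hPre _ hpre1
    have htok : tokens = (pre ++ [tok]) ++ rest' := by rw [h]; simp
    have hlen1 : (((pre ++ [tok]).length : Int)) = (pre.length : Int) + 1 := by simp
    have htake : tokens.take pre.length = pre := by rw [h]; exact List.take_left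
    have hgetDk : (pvLook pairs ((pre.length : Int))).getD [tok] = [tok] := by
      rw [hkeys _ le_rfl]; rfl
    have e1 : pvEmit pairs (PySem.List.enumerate pre 0) ++ [tok]
        = pvEmit pairs (PySem.List.enumerate (pre ++ [tok]) 0) := by
      rw [pvEmit_snoc, hgetDk]
    simp only [List.foldl_cons, PySem.List.enumerate_cons]
    by_cases hOP : tok.1 = 54
    case neg =>
      have hOP' : (tok.1 == 54) = false := by simpa using hOP
      have hno : pvIsOpen tok = false := by simp [pvIsOpen, hOP']
      have hnc : pvIsClose tok = false := by simp [pvIsClose, hOP']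
      have step : pvStepA (pvEmit pairs (PySem.List.enumerate pre 0), sA) tok
          = (pvEmit pairs (PySem.List.enumerate (pre ++ [tok]) 0), sA) := by
        simp [pvStepA, hOP', ← e1]
      have stepB : pvPairsStep (pairs, sB) ((pre.length : Int), tok) = (pairs, sB) := by
        simp [pvPairsStep, hOP']
      rw [step, stepB, show ((pre.length : Int) + 1) = (((pre ++ [tok]).length : Int)) from hlen1.symm]
      refine ih (pre ++ [tok]) pairs sB sA htok ?_ hpw ?_ hsA ?_ hnd
      · exact fun q hqm => ⟨(hq q hqm).1, by have := (hq q hqm).2.1; rw [hlen1]; omega, (hq q hqm).2.2⟩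
      · exact fun j hj => hkeys j (by rw [hlen1] at hj; omega)
      · rw [pvCount_snoc, pvCount_snoc, hno, hnc]; simpa using hlen
    case pos =>
      have hOP' : (tok.1 == 54) = true := by simpa using hOP
      by_cases hO : PySem.Str.isIn tok.2 "([{" = true
      · -- opening bracket: push
        have hO2 : PySem.Chars.isIn tok.2.toList ['(', '[', '{'] = true := by simpa using hO
        have hyo : pvIsOpen tok = true := by simp [pvIsOpen, hOP', hO2]
        have hnc : pvIsClose tok = false := by simp [pvIsClose, hO2]
        have step : pvStepA (pvEmit pairs (PySem.List.enumerate pre 0), sA) tok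
            = (pvEmit pairs (PySem.List.enumerate (pre ++ [tok]) 0),
               (tok.2, (pvEmit pairs (PySem.List.enumerate pre 0)).length) :: sA) := by
          simp [pvStepA, hOP', hO2, ← e1]
        have stepB : pvPairsStep (pairs, sB) ((pre.length : Int), tok)
            = (pairs, ((pre.length : Int), tok.2) :: sB) := by
          simp [pvPairsStep, hOP', hO2]
        rw [step, stepB, show ((pre.length : Int) + 1) = (((pre ++ [tok]).length : Int)) from hlen1.symm]
        refine ih (pre ++ [tok]) pairs (((pre.length : Int), tok.2) :: sB) _ htok ?_ ?_ ?_ ?_ ?_ hnd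
        · intro q hqm
          rcases List.mem_cons.mp hqm with rfl | hqm'
          · exact ⟨Int.natCast_nonneg _, by rw [hlen1]; omega, hkeys _ le_rfl⟩
          · obtain ⟨a, b, c⟩ := hq q hqm'
            exact ⟨a, by rw [hlen1]; omega, c⟩
        · exact List.Pairwise.cons (fun b hb => (hq b hb).2.1) hpw
        · exact fun j hj => hkeys j (by rw [hlen1] at hj; omega)
        · simp only [List.map_cons]
          rw [← hsA]
          simp [Int.toNat_natCast, htake]
        · rw [pvCount_snoc, pvCount_snoc, hyo, hnc]
          simp only [if_true, Bool.false_eq_true, if_false, List.length_cons]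
          omega
      · by_cases hC : PySem.Str.isIn tok.2 ")]}" = true
        · -- closing bracket
          have hO2' : PySem.Chars.isIn tok.2.toList ['(', '[', '{'] = false := by simpa using hO
          have hC2 : PySem.Chars.isIn tok.2.toList [')', ']', '}'] = true := by simpa using hC
          have hno : pvIsOpen tok = false := by simp [pvIsOpen, hO2']
          have hyc : pvIsClose tok = true := by simp [pvIsClose, hOP', hO2', hC2]
          rw [pvCount_snoc, pvCount_snoc, hno, hyc] at hPre1
          simp only [if_true, Bool.false_eq_true, if_false] at hPre1
          match sB, hpw, hlen with
          | [], _, hlen =>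
            exfalso
            simp only [List.length_nil] at hlen
            omega
          | (lidx, lname) :: restB, hpw, hlen =>
            obtain ⟨hl0, hlk, hlnone⟩ := hq (lidx, lname) List.mem_cons_self
            have hpwh := (List.pairwise_cons.mp hpw).1
            have hpw' := (List.pairwise_cons.mp hpw).2
            subst hsA
            rcases hmap : pvMapping lname tok.2 with _ | f
            · -- no mapping: plain pop
              have step : pvStepA (pvEmit pairs (PySem.List.enumerate pre 0),
                  ((lidx, lname) :: restB).map (fun q => (q.2, (pvEmit pairs (PySem.List.enumerate (tokens.take q.1.toNat) 0)).length))) tok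
                  = (pvEmit pairs (PySem.List.enumerate (pre ++ [tok]) 0),
                     restB.map (fun q => (q.2, (pvEmit pairs (PySem.List.enumerate (tokens.take q.1.toNat) 0)).length))) := by
                simp [pvStepA, hOP', hO2', hC2, hmap, ← e1]
              have stepB : pvPairsStep (pairs, (lidx, lname) :: restB) ((pre.length : Int), tok)
                  = (pairs, restB) := by
                simp [pvPairsStep, hOP', hO2', hC2, hmap]
              rw [step, stepB, show ((pre.length : Int) + 1) = (((pre ++ [tok]).length : Int)) from hlen1.symm]
              refine ih (pre ++ [tok]) pairs restB _ htok ?_ hpw' ?_ rfl ?_ hnd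
              · intro q hqm
                obtain ⟨a, b, c⟩ := hq q (List.mem_cons_of_mem _ hqm)
                exact ⟨a, by rw [hlen1]; omega, c⟩
              · exact fun j hj => hkeys j (by rw [hlen1] at hj; omega)
              · rw [pvCount_snoc, pvCount_snoc, hno, hyc]
                simp only [if_true, Bool.false_eq_true, if_false]
                simp only [List.length_cons] at hlen
                omega
            · -- mapped pair: splice on the A side, pairs append on the B side
              set ln : Nat := lidx.toNat with hlndef
              have hln : (ln : Int) = lidx := Int.toNat_of_nonneg hl0
              have hlt : ln < pre.length := by omega
              have htakel : tokens.take ln = pre.take ln := by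
                rw [h]; exact List.take_append_of_le_length hlt.le
              set E1 := pvEmit pairs (PySem.List.enumerate (pre.take ln) 0) with hE1def
              set E2 := pvEmit pairs (PySem.List.enumerate (pre.drop (ln+1)) ((ln : Int)+1)) with hE2def
              have hgetln : (pvLook pairs ((ln : Int))).getD [pre[ln]] = [pre[ln]] := by
                rw [hln, hlnone]; rfl
              have hres : pvEmit pairs (PySem.List.enumerate pre 0) = E1 ++ pre[ln] :: E2 := by
                rw [pvEmit_decomp pairs pre ln hlt, hgetln]
                rw [← hE1def, ← hE2def]
                simp only [List.append_assoc, List.singleton_append]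
              have hLval : (pvEmit pairs (PySem.List.enumerate (tokens.take lidx.toNat) 0)).length
                  = E1.length := by rw [← hlndef, htakel]
              set pairs' := pairs ++ [(lidx, ((pre.length : Int)), f)] with hpairs'def
              have hknone : pvLook pairs ((pre.length : Int)) = none := hkeys _ le_rfl
              have step : pvStepA (pvEmit pairs (PySem.List.enumerate pre 0),
                  ((lidx, lname) :: restB).map (fun q => (q.2, (pvEmit pairs (PySem.List.enumerate (tokens.take q.1.toNat) 0)).length))) tok
                  = ((PySem.List.insert ((pvEmit pairs (PySem.List.enumerate pre 0)).set E1.length (54, "(")) ((E1.length : Int)) (1, f)) ++ [(tok.1, ")")],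
                     restB.map (fun q => (q.2, (pvEmit pairs (PySem.List.enumerate (tokens.take q.1.toNat) 0)).length))) := by
                simp [pvStepA, hOP', hO2', hC2, hmap, hLval]
              have stepB : pvPairsStep (pairs, (lidx, lname) :: restB) ((pre.length : Int), tok)
                  = (pairs', restB) := by
                simp [pvPairsStep, hOP', hO2', hC2, hmap, hpairs'def]
              have hset : (pvEmit pairs (PySem.List.enumerate pre 0)).set E1.length (54, "(")
                  = E1 ++ (54, "(") :: E2 := by rw [hres]; simp
              have hins : PySem.List.insert (E1 ++ (54, "(") :: E2) ((E1.length : Int)) (1, f)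
                  = E1 ++ (1, f) :: (54, "(") :: E2 := by
                rw [PySem.List.insert_natCast _ _ _ (by simp)]
                rw [List.take_left, List.drop_left]
              have hE1' : pvEmit pairs' (PySem.List.enumerate (pre.take ln) 0) = E1 := by
                refine pvEmit_congr _ _ _ ?_
                intro p hp
                obtain ⟨kk, hkk, hpeq⟩ := (PySem.List.mem_enumerate_iff _ _ _).mp hp
                subst hpeq
                have hkk' : kk < ln := by
                  have := hkk; simp [List.length_take] at this; omega
                exact pvLook_append_ne _ _ _ _ _ (by simp; omega) (by simp; omega)
              have hE2' : pvEmit pairs' (PySem.List.enumerate (pre.drop (ln+1)) ((ln : Int)+1)) = E2 := by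
                refine pvEmit_congr _ _ _ ?_
                intro p hp
                obtain ⟨kk, hkk, hpeq⟩ := (PySem.List.mem_enumerate_iff _ _ _).mp hp
                subst hpeq
                have hkk' : kk < pre.length - (ln+1) := by
                  have := hkk; simp [List.length_drop] at this; omega
                exact pvLook_append_ne _ _ _ _ _ (by simp; omega) (by simp; omega)
              have hgetln' : (pvLook pairs' ((ln : Int))).getD [pre[ln]] = [(1, f), (54, "(")] := by
                rw [hln, pvLook_append_left _ _ _ _ ((pvLook_none_iff _ _).mp hlnone).1]; rfl
              have hgetk' : (pvLook pairs' ((pre.length : Int))).getD [tok] = [(54, ")")] := by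
                rw [pvLook_append_right _ _ _ _ (by omega) ((pvLook_none_iff _ _).mp hknone).1 ((pvLook_none_iff _ _).mp hknone).2]; rfl
              have hmainres : (PySem.List.insert ((pvEmit pairs (PySem.List.enumerate pre 0)).set E1.length (54, "(")) ((E1.length : Int)) (1, f)) ++ [(tok.1, ")")]
                  = pvEmit pairs' (PySem.List.enumerate (pre ++ [tok]) 0) := by
                rw [hset, hins, pvEmit_snoc, pvEmit_decomp pairs' pre ln hlt, hE1', hE2', hgetln', hgetk', hOP]
                simp
              rw [step, stepB, hmainres,
                 show ((pre.length : Int) + 1) = (((pre ++ [tok]).length : Int)) from hlen1.symm]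
              refine ih (pre ++ [tok]) pairs' restB _ htok ?_ hpw' ?_ ?_ ?_ ?_
              · intro q hqm
                obtain ⟨a, b, c⟩ := hq q (List.mem_cons_of_mem _ hqm)
                have hqlt : q.1 < lidx := hpwh q hqm
                refine ⟨a, by rw [hlen1]; omega, ?_⟩
                rw [hpairs'def, pvLook_append_ne _ _ _ _ _ (by omega) (by omega), c]
              · intro j hj
                rw [hlen1] at hj
                rw [hpairs'def, pvLook_append_ne _ _ _ _ _ (by omega) (by omega)]
                exact hkeys j (by omega)
              · refine (List.map_eq_map_iff.mpr ?_).symm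
                intro q hqm
                obtain ⟨a, b, c⟩ := hq q (List.mem_cons_of_mem _ hqm)
                have hqlt : q.1 < lidx := hpwh q hqm
                have hcong : pvEmit pairs' (PySem.List.enumerate (tokens.take q.1.toNat) 0)
                    = pvEmit pairs (PySem.List.enumerate (tokens.take q.1.toNat) 0) := by
                  refine pvEmit_congr _ _ _ ?_
                  intro p hp
                  obtain ⟨kk, hkk, hpeq⟩ := (PySem.List.mem_enumerate_iff _ _ _).mp hp
                  subst hpeq
                  have hkk' : kk ≤ q.1.toNat := by
                    have := hkk; simp [List.length_take] at this; omega
                  rw [hpairs'def]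
                  exact pvLook_append_ne _ _ _ _ _ (by simp; omega) (by simp; omega)
                rw [hcong]
              · rw [pvCount_snoc, pvCount_snoc, hno, hyc]
                simp only [if_true, Bool.false_eq_true, if_false]
                simp only [List.length_cons] at hlen
                omega
              · rw [hpairs'def]
                simp only [List.map_append, List.map_cons, List.map_nil]
                rw [List.nodup_append]
                refine ⟨hnd, List.nodup_singleton _, ?_⟩
                intro a hma b hmb heq
                have hb' : b = lidx := by simpa using hmb
                exact (pvLook_none_not_memFst pairs lidx hlnone)
                  (by rw [← hb', ← heq]; exact hma)
        · -- OP but neither an opening nor a closing bracket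
          have hO2' : PySem.Chars.isIn tok.2.toList ['(', '[', '{'] = false := by simpa using hO
          have hC2' : PySem.Chars.isIn tok.2.toList [')', ']', '}'] = false := by simpa using hC
          have hno : pvIsOpen tok = false := by simp [pvIsOpen, hO2']
          have hnc : pvIsClose tok = false := by simp [pvIsClose, hC2']
          have step : pvStepA (pvEmit pairs (PySem.List.enumerate pre 0), sA) tok
              = (pvEmit pairs (PySem.List.enumerate (pre ++ [tok]) 0), sA) := by
            simp [pvStepA, hOP', hO2', hC2', ← e1]
          have stepB : pvPairsStep (pairs, sB) ((pre.length : Int), tok) = (pairs, sB) := by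
            simp [pvPairsStep, hOP', hO2', hC2']
          rw [step, stepB, show ((pre.length : Int) + 1) = (((pre ++ [tok]).length : Int)) from hlen1.symm]
          refine ih (pre ++ [tok]) pairs sB sA htok ?_ hpw ?_ hsA ?_ hnd
          · exact fun q hqm => ⟨(hq q hqm).1, by have := (hq q hqm).2.1; rw [hlen1]; omega, (hq q hqm).2.2⟩
          · exact fun j hj => hkeys j (by rw [hlen1] at hj; omega)
          · rw [pvCount_snoc, pvCount_snoc, hno, hnc]; simpa using hlen

-- the paired starts/ends fold splits into two independent folds
lemma pvFoldPair (pairs : List (Int × Int × String)) (d : PySem.Dict Int String)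
    (s : PySem.Set Int) :
    pairs.foldl (fun st t => (st.1.insert t.1 t.2.2, PySem.Set.add st.2 t.2.1)) (d, s)
      = (pairs.foldl (fun d t => d.insert t.1 t.2.2) d,
         pairs.foldl (fun s t => PySem.Set.add s t.2.1) s) := by
  induction pairs generalizing d s with
  | nil => rfl
  | cons t rest ih => simp only [List.foldl_cons]; exact ih _ _

-- the starts dict looks up the FIRST matching pair (keys are distinct)
lemma pvStartsGet (pairs : List (Int × Int × String)) (d : PySem.Dict Int String) (k : Int)
    (hnd : (pairs.map (fun t => t.1)).Nodup) :
    (pairs.foldl (fun d t => d.insert t.1 t.2.2) d).get? k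
      = match pairs.find? (fun t => t.1 == k) with
        | some t => some t.2.2
        | none => d.get? k := by
  induction pairs generalizing d with
  | nil => rfl
  | cons t rest ih =>
    simp only [List.map_cons, List.nodup_cons] at hnd
    simp only [List.foldl_cons]
    rw [ih _ hnd.2]
    by_cases hk : t.1 = k
    · have hfr : rest.find? (fun u => u.1 == k) = none := by
        rw [List.find?_eq_none]
        intro u hu
        simp only [beq_iff_eq]
        intro heq
        exact hnd.1 (List.mem_map.mpr ⟨u, hu, by omega⟩)
      subst hk
      simp [hfr, List.find?, PySem.Dict.get?_insert_self]
    · rcases hfr : rest.find? (fun u => u.1 == k) with _ | u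
      · simp [List.find?, hfr, show (t.1 == k) = false by simpa using hk,
          PySem.Dict.get?_insert_of_ne _ _ (Ne.symm hk)]
      · simp [List.find?, hfr, show (t.1 == k) = false by simpa using hk]

-- the ends set contains exactly the close indices of pairs
lemma pvEndsMem (pairs : List (Int × Int × String)) (s : PySem.Set Int) (k : Int) :
    k ∈ pairs.foldl (fun s t => PySem.Set.add s t.2.1) s ↔ k ∈ s ∨ ∃ t ∈ pairs, t.2.1 = k := by
  induction pairs generalizing s with
  | nil => simp
  | cons t rest ih =>
    simp only [List.foldl_cons]
    rw [ih]
    rw [PySem.Set.mem_add]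
    constructor
    · rintro ((h | h) | ⟨u, hu, hv⟩)
      · exact Or.inl h
      · exact Or.inr ⟨t, List.mem_cons_self, h.symm⟩
      · exact Or.inr ⟨u, List.mem_cons_of_mem _ hu, hv⟩
    · rintro (h | ⟨u, hu, hv⟩)
      · exact Or.inl (Or.inl h)
      · rcases List.mem_cons.mp hu with rfl | hu'
        · exact Or.inl (Or.inr hv.symm)
        · exact Or.inr ⟨u, hu', hv⟩

-- B's emission fold equals pvEmit of the final pairs list
lemma pvAltEmit (tokens : List (Int × String)) (pairs : List (Int × Int × String))
    (hnd : (pairs.map (fun t => t.1)).Nodup) :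
    (PySem.List.enumerate tokens).foldl
      (fun out p =>
        match ((pairs.foldl (fun d t => d.insert t.1 t.2.2) (PySem.Dict.empty : PySem.Dict Int String))).get? p.1 with
        | some f => out ++ [(1, f), (54, "(")]
        | none => if PySem.Set.contains (pairs.foldl (fun s t => PySem.Set.add s t.2.1) (PySem.Set.empty : PySem.Set Int)) p.1
                  then out ++ [(54, ")")] else out ++ [p.2])
      []
      = pvEmit pairs (PySem.List.enumerate tokens 0) := by
  have hstep : (fun (out : List (Int × String)) (p : Int × (Int × String)) =>
      match ((pairs.foldl (fun d t => d.insert t.1 t.2.2) (PySem.Dict.empty : PySem.Dict Int String))).get? p.1 with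
      | some f => out ++ [(1, f), (54, "(")]
      | none => if PySem.Set.contains (pairs.foldl (fun s t => PySem.Set.add s t.2.1) (PySem.Set.empty : PySem.Set Int)) p.1
                then out ++ [(54, ")")] else out ++ [p.2])
      = (fun out p => out ++ (pvLook pairs p.1).getD [p.2]) := by
    funext out p
    rw [pvStartsGet _ _ _ hnd]
    have hends : PySem.Set.contains (pairs.foldl (fun s t => PySem.Set.add s t.2.1) (PySem.Set.empty : PySem.Set Int)) p.1
        = pairs.any (fun t => t.2.1 == p.1) := by
      rcases h : pairs.any (fun t => t.2.1 == p.1) with _ | _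
      · simp only [List.any_eq_false, beq_iff_eq] at h
        rw [Bool.eq_false_iff]
        intro hc
        have := (pvEndsMem pairs PySem.Set.empty p.1).mp ((PySem.Set.contains_iff _ _).mp hc)
        rcases this with h' | ⟨t, ht, hv⟩
        · simp [PySem.Set.empty] at h'
        · exact h t ht hv
      · simp only [List.any_eq_true, beq_iff_eq] at h
        obtain ⟨t, ht, hv⟩ := h
        exact (PySem.Set.contains_iff _ _).mpr ((pvEndsMem pairs PySem.Set.empty p.1).mpr (Or.inr ⟨t, ht, hv⟩))
    unfold pvLook
    rcases hf : pairs.find? (fun t => t.1 == p.1) with _ | t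
    · rw [hends]
      rcases ha : pairs.any (fun t => t.2.1 == p.1) with _ | _ <;> simp [hf, ha]
    · simp [hf]
  rw [hstep, PySem.List.foldl_append_eq_flatMap]
  rfl

-- ===== VERDICT (by name: the statement is the Claim_ definition above) =====
theorem auto_interval_spec : Claim_equal_auto_interval := by
  intro tokens ld gd _ hPre
  unfold Spec_auto_interval auto_interval auto_interval_alt
  have hm := pvMain tokens hPre tokens [] [] [] []
    (by simp) (by simp) (by simp) (fun j _ => rfl) (by simp) (by simp) (by simp)
  simp only [List.length_nil, Nat.cast_zero, PySem.List.enumerate_nil] at hm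
  obtain ⟨heq, hnd⟩ := hm
  rw [show pvEmit [] [] = [] from rfl] at heq
  rw [heq]
  simp only [pvFoldPair]
  rw [pvAltEmit _ _ hnd]
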